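-- pv_equiv track=rewrite | github.com/Abhik-67/Phython--codes | minimum_addition.py | minAddition
-- ===== SOURCE A (Python) =====
-- def minAddition(N):
--     list=[]
--     for i in str(N):
--         list.append(int(i))
--     list.sort()
--     sum1,sum2=0,0
--     for i in range(len(list)):
--         if i%2==0:
--             sum1=sum1*10+list[i]
--         else:
--             sum2=sum2*10+list[i]
--     return sum2+sum1
-- ===== SOURCE B (Python) =====
-- def minAddition(N):
--     total = 0
--     place = 1
--     for k, d in enumerate(sorted((int(c) for c in str(N)), reverse=True)):
--         total += d * place
--         if k % 2 == 1:
--             place *= 10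
--     return total
-- ===== Notes on version B (the rewrite author's own statement) =====
-- stated objective: alternative
-- what changed: Instead of splitting the ascending digits alternately into two Horner-built numbers and adding them, B sorts the digits descending and accumulates a single weighted sum, multiplying one running place value by 10 after every second digit; no pair of interleaved numbers is ever built.
import Mathlib
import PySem

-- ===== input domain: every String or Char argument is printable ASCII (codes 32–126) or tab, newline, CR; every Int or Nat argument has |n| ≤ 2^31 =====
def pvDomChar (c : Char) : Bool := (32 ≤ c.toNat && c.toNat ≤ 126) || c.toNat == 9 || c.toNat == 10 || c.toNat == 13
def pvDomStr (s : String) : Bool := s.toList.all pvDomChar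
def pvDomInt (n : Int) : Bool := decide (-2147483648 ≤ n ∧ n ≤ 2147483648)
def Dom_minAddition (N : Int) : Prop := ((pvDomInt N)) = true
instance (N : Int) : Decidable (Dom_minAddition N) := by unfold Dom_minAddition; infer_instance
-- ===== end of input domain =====

-- B replaces A's alternate splitting of the ascending digits into two Horner-built numbers
-- by a single place-value weighted sum over the digits sorted descending (alternative decomposition, same cost).


-- shared primitive: Python's int(ch) on a one-character string; under Pre_ (0 ≤ N) every
-- character of str(N) is a decimal digit, so the .getD 0 default is never taken
def pvInt1 (c : Char) : Int := (PySem.Int.ofChars? [c]).getD 0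

-- ===== PORT A =====
def minAddition (N : Int) : Int :=
  -- list=[]; for i in str(N): list.append(int(i))
  let l : List Int := (PySem.Int.toChars N).foldl (fun acc c => acc ++ [pvInt1 c]) []
  -- list.sort()
  let l := PySem.List.sorted l (fun x => x) false
  -- for i in range(len(list)): alternate sum1/sum2 on i % 2
  let s := (PySem.List.pyRange 0 (l.length : Int) 1).foldl
    (fun (p : Int × Int) i =>
      if PySem.Int.mod i 2 = 0 then (p.1 * 10 + PySem.List.pyGetD l i 0, p.2)
      else (p.1, p.2 * 10 + PySem.List.pyGetD l i 0)) (0, 0)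
  s.2 + s.1

-- ===== PORT B =====
def minAddition_alt (N : Int) : Int :=
  -- sorted((int(c) for c in str(N)), reverse=True)
  let r : List Int := PySem.List.sorted ((PySem.Int.toChars N).map pvInt1) (fun x => x) true
  -- for k, d in enumerate(r): total += d*place; if k % 2 == 1: place *= 10
  let st := (PySem.List.enumerate r).foldl
    (fun (st : Int × Int) (kd : Int × Int) =>
      (st.1 + kd.2 * st.2, if PySem.Int.mod kd.1 2 = 1 then st.2 * 10 else st.2)) (0, 1)
  st.1

-- ===== PRECONDITION & SPEC =====
-- Pre_ excludes N < 0, where str(N) starts with '-' and int('-') raises ValueError in A (and in B).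
def Pre_minAddition (N : Int) : Prop := 0 ≤ N
instance (N : Int) : Decidable (Pre_minAddition N) := by unfold Pre_minAddition; infer_instance
def pvWitness_minAddition : Int := (203)

def Spec_minAddition (N : Int) (out : Int) : Prop := out = minAddition_alt N
instance (N : Int) (out : Int) : Decidable (Spec_minAddition N out) := by unfold Spec_minAddition; infer_instance

-- ===== CLAIM (what is proved, stated in full; the proofs are below) =====
def Claim_equal_minAddition : Prop := ∀ (N : Int), Dom_minAddition N → Pre_minAddition N → Spec_minAddition N (minAddition N)

-- ===== LEMMAS AND PROOFS =====

-- A's emission step: extend sum1 or sum2 by d according to the parity of the position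
def pvStep (st : Int × Int × Int) (d : Int) : Int × Int × Int :=
  if PySem.Int.mod st.2.2 2 = 0 then (st.1 * 10 + d, st.2.1, st.2.2 + 1)
  else (st.1, st.2.1 * 10 + d, st.2.2 + 1)

-- the even- and odd-index sublists
mutual
def pvEvens : List Int → List Int
  | [] => []
  | a :: t => a :: pvOdds t
def pvOdds : List Int → List Int
  | [] => []
  | _ :: t => pvEvens t
end

-- Horner accumulation (A's sum1/sum2 builder)
def pvH (s : Int) (l : List Int) : Int := l.foldl (fun s d => s * 10 + d) s

-- B's weighted-sum value: place weights 1,1,10,10,… (flag = place doubles after this step)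
def pvGs : List Int → Bool → Int
  | [], _ => 0
  | d :: r, b => d + (if b then 10 else 1) * pvGs r (!b)

-- A's index loop over the list computes the emission fold (position = index)
lemma pv_afold (full : List Int) (a : Nat) (s1 s2 : Int) (ha : a ≤ full.length) :
    (PySem.List.pyRange (a : Int) (full.length : Int) 1).foldl
      (fun (p : Int × Int) i =>
        if PySem.Int.mod i 2 = 0 then (p.1 * 10 + PySem.List.pyGetD full i 0, p.2)
        else (p.1, p.2 * 10 + PySem.List.pyGetD full i 0)) (s1, s2)
    = (((full.drop a).foldl pvStep (s1, s2, (a : Int))).1,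
       ((full.drop a).foldl pvStep (s1, s2, (a : Int))).2.1) := by
  induction hn : full.length - a generalizing a s1 s2 with
  | zero =>
    have ha' : a = full.length := by omega
    subst ha'
    rw [PySem.List.pyRange_one_eq_nil (by omega), List.drop_length]
    simp
  | succ n ih =>
    have hlt : a < full.length := by omega
    rw [PySem.List.pyRange_one_cons (by exact_mod_cast hlt)]
    rw [List.drop_eq_getElem_cons hlt]
    have hget : PySem.List.pyGetD full (a : Int) 0 = full[a] := by
      rw [PySem.List.pyGetD_eq_getElem full 0 (by omega) (by exact_mod_cast hlt)]
      simp
    simp only [List.foldl_cons, hget, pvStep]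
    by_cases hm : PySem.Int.mod (a : Int) 2 = 0
    · simp only [hm, if_true]
      have := ih (a + 1) (s1 * 10 + full[a]) s2 (by omega) (by omega)
      simpa [Nat.cast_add] using this
    · simp only [hm, if_false]
      have := ih (a + 1) s1 (s2 * 10 + full[a]) (by omega) (by omega)
      simpa [Nat.cast_add] using this

-- the emission fold splits the list into the two Horner sums by index parity
lemma pv_fchar (l : List Int) : ∀ (s1 s2 : Int) (m : Nat),
    l.foldl pvStep (s1, s2, (m : Int))
    = (pvH s1 (if m % 2 = 0 then pvEvens l else pvOdds l),
       pvH s2 (if m % 2 = 0 then pvOdds l else pvEvens l),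
       ((m + l.length : Nat) : Int)) := by
  induction l with
  | nil => intro s1 s2 m; simp [pvEvens, pvOdds, pvH]
  | cons a t ih =>
    intro s1 s2 m
    have hmod : PySem.Int.mod ((m : Nat) : Int) 2 = ((m % 2 : Nat) : Int) :=
      PySem.Int.mod_natCast m 2
    rcases Nat.even_or_odd m with hm | hm
    · have h0 : m % 2 = 0 := Nat.even_iff.1 hm
      have hc : PySem.Int.mod ((m : Nat) : Int) 2 = 0 := by rw [hmod, h0]; rfl
      have hstep : pvStep (s1, s2, (m : Int)) a = (s1 * 10 + a, s2, ((m + 1 : Nat) : Int)) := by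
        simp only [pvStep]
        rw [if_pos hc]
        simp only [Prod.mk.injEq]
        refine ⟨trivial, trivial, by push_cast; ring⟩
      rw [List.foldl_cons, hstep, ih]
      have h1 : (m + 1) % 2 = 1 := by omega
      simp [pvEvens, pvOdds, pvH, h0, h1]
      all_goals omega
    · have h1 : m % 2 = 1 := Nat.odd_iff.1 hm
      have hc : ¬ PySem.Int.mod ((m : Nat) : Int) 2 = 0 := by rw [hmod, h1]; decide
      have hstep : pvStep (s1, s2, (m : Int)) a = (s1, s2 * 10 + a, ((m + 1 : Nat) : Int)) := by
        simp only [pvStep]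
        rw [if_neg hc]
        simp only [Prod.mk.injEq]
        refine ⟨trivial, trivial, by push_cast; ring⟩
      rw [List.foldl_cons, hstep, ih]
      have h0 : (m + 1) % 2 = 0 := by omega
      simp [pvEvens, pvOdds, pvH, h0, h1]
      all_goals omega

-- Horner with an accumulator
lemma pv_H_acc (l : List Int) : ∀ s : Int, pvH s l = s * 10 ^ l.length + pvH 0 l := by
  induction l with
  | nil => intro s; simp [pvH]
  | cons a t ih =>
    intro s
    have h1 : pvH s (a :: t) = pvH (s * 10 + a) t := rfl
    have h2 : pvH 0 (a :: t) = pvH a t := by simp [pvH]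
    rw [h1, h2, ih (s * 10 + a), ih a]
    simp only [List.length_cons, pow_succ]
    ring

-- lengths of the parity sublists
lemma pv_parity_len (l : List Int) :
    (pvEvens l).length = (l.length + 1) / 2 ∧ (pvOdds l).length = l.length / 2 := by
  induction l with
  | nil => simp [pvEvens, pvOdds]
  | cons a t ih =>
    refine ⟨?_, ?_⟩
    · simp only [pvEvens, List.length_cons, ih.2]; omega
    · simp only [pvOdds, List.length_cons, ih.1]

-- appending one element to B's weighted sum adds it at the next place value
lemma pv_gs_append (r : List Int) : ∀ (x : Int) (b : Bool),
    pvGs (r ++ [x]) b = pvGs r b + x * 10 ^ ((r.length + (if b then 1 else 0)) / 2) := by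
  induction r with
  | nil => intro x b; cases b <;> simp [pvGs]
  | cons d r ih =>
    intro x b
    simp only [List.cons_append, pvGs, ih x (!b)]
    cases b
    · simp only [Bool.not_false, List.length_cons]
      norm_num
      all_goals ring
    · simp only [Bool.not_true, List.length_cons]
      norm_num
      rw [show (r.length + 1 + 1) / 2 = r.length / 2 + 1 by omega, pow_succ]
      ring

-- the central identity: B's descending weighted sum equals A's two ascending Horner sums
lemma pv_main (l : List Int) :
    pvGs l.reverse false = pvH 0 (pvOdds l) + pvH 0 (pvEvens l) := by
  induction l with
  | nil => simp [pvGs, pvOdds, pvEvens, pvH]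
  | cons a t ih =>
    have hrev : (a :: t).reverse = t.reverse ++ [a] := by simp
    rw [hrev, pv_gs_append, ih]
    have hO : pvOdds (a :: t) = pvEvens t := rfl
    have hE : pvH 0 (pvEvens (a :: t)) = a * 10 ^ (t.length / 2) + pvH 0 (pvOdds t) := by
      have h1 : pvH 0 (pvEvens (a :: t)) = pvH a (pvOdds t) := by simp [pvEvens, pvH]
      rw [h1, pv_H_acc, (pv_parity_len t).2]
    have hexp : (t.reverse.length + (if (false : Bool) = true then 1 else 0)) / 2 = t.length / 2 := by
      simp
    rw [hO, hE, hexp]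
    ring

-- B's enumerate loop computes the weighted sum
lemma pv_gchar (r : List Int) : ∀ (m : Nat) (t p : Int),
    ((PySem.List.enumerate r ((m : Nat) : Int)).foldl
      (fun (st : Int × Int) (kd : Int × Int) =>
        (st.1 + kd.2 * st.2, if PySem.Int.mod kd.1 2 = 1 then st.2 * 10 else st.2)) (t, p)).1
    = t + p * pvGs r (m % 2 = 1) := by
  induction r with
  | nil => intro m t p; simp [PySem.List.enumerate_nil, pvGs]
  | cons d r ih =>
    intro m t p
    rw [PySem.List.enumerate_cons, List.foldl_cons]
    have hmod : PySem.Int.mod ((m : Nat) : Int) 2 = ((m % 2 : Nat) : Int) :=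
      PySem.Int.mod_natCast m 2
    have hcast : ((m : Nat) : Int) + 1 = ((m + 1 : Nat) : Int) := by push_cast; ring
    rcases Nat.even_or_odd m with hm | hm
    · have h0 : m % 2 = 0 := Nat.even_iff.1 hm
      have h1 : (m + 1) % 2 = 1 := by omega
      have hne : ¬ PySem.Int.mod ((m : Nat) : Int) 2 = 1 := by rw [hmod, h0]; decide
      simp only [hne, if_false, hcast, ih (m + 1)]
      simp [pvGs, h0, h1]
      ring
    · have h1 : m % 2 = 1 := Nat.odd_iff.1 hm
      have h0 : (m + 1) % 2 = 0 := by omega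
      have heq : PySem.Int.mod ((m : Nat) : Int) 2 = 1 := by rw [hmod, h1]; decide
      simp only [heq, if_true, hcast, ih (m + 1)]
      simp [pvGs, h0, h1]
      ring

-- the descending sort is the reverse of the ascending sort (Int values, identity key)
lemma pv_sorted_rev (ds : List Int) :
    PySem.List.sorted ds (fun x => x) true = (PySem.List.sorted ds (fun x => x) false).reverse := by
  refine @List.Perm.eq_of_pairwise' Int (fun a b : Int => b ≤ a)
    ⟨fun _ _ h1 h2 => le_antisymm h2 h1⟩ _ _
    (PySem.List.sorted_pairwise_rev ds (fun x => x))
    ((List.pairwise_reverse).2 (by simpa using PySem.List.sorted_pairwise ds (fun x => x)))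
    ((PySem.List.sorted_perm ds (fun x => x) true).trans
      ((PySem.List.sorted_perm ds (fun x => x) false).symm.trans (List.reverse_perm _).symm))

theorem minAddition_spec : Claim_equal_minAddition := by
  intro N _ _
  unfold Spec_minAddition minAddition minAddition_alt
  have hbuild : (PySem.Int.toChars N).foldl (fun acc c => acc ++ [pvInt1 c]) []
      = (PySem.Int.toChars N).map pvInt1 := by
    simpa using PySem.List.foldl_append_singleton_eq_map pvInt1 (PySem.Int.toChars N) []
  set ds : List Int := (PySem.Int.toChars N).map pvInt1 with hds
  set L : List Int := PySem.List.sorted ds (fun x => x) false with hL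
  have hA := pv_afold L 0 0 0 (by omega)
  simp only [Nat.cast_zero, List.drop_zero] at hA
  have hF := pv_fchar L 0 0 0
  simp only [Nat.cast_zero, Nat.zero_mod, Nat.zero_add] at hF
  have hG := pv_gchar (PySem.List.sorted ds (fun x => x) true) 0 0 1
  simp only [Nat.cast_zero, Nat.zero_mod] at hG
  simp only [hbuild, ← hL]
  rw [hA, hF, hG, pv_sorted_rev, ← hL]
  simp
  exact (pv_main L).symm
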